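-- pv_equiv track=rewrite | github.com/marty777/adventofcode2015 | src/day19.py | replacements
-- ===== SOURCE A (Python) =====
-- def replacements(string, src, replacement):
--     results = []
--     index = 0
--     while(index < len(string)):
--         index = string.find(src, index)
--         if index == -1:
--             break
--         result = string[0:index] + replacement + string[(index + len(src)):]
--         results.append(result)
--         index += 1
--     return results
-- ===== SOURCE B (Python) =====
-- def replacements(string, src, replacement):
--     k = len(src)
--     return [string[:i] + replacement + string[i + k:]
--             for i in range(len(string)) if string[i:i + k] == src]
-- ===== Notes on version B (the rewrite author's own statement) =====
-- stated objective: idiomatic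
-- what changed: Replaces the find-and-jump while loop (index advanced via str.find, break on -1, explicit results accumulator) with a single comprehension over all start positions filtered by a substring-equality test at each position.
import Mathlib
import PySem

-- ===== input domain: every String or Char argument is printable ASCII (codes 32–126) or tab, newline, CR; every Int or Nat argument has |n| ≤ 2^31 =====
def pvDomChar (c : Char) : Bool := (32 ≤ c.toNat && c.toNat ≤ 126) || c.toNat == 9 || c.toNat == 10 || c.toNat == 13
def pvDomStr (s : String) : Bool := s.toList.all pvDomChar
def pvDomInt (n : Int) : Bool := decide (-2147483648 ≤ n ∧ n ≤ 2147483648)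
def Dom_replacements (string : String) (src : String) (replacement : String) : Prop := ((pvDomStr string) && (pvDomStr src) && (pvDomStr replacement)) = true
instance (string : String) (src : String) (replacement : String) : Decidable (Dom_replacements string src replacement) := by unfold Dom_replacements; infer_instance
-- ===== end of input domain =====

-- B replaces A's find-and-jump while loop by a comprehension over all start
-- positions filtered by a substring-equality test (idiomatic; not claimed faster).

-- ===== PORT A =====
-- helper for A's termination proof: find from index returns ≥ index
theorem pv_findFrom_ge (s p : List Char) (index : Nat) (hlt : index < s.length)
    (hne : PySem.Chars.findFrom s p (index : Int) none ≠ -1) :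
    index < (PySem.Chars.findFrom s p (index : Int) none).toNat + 1 := by
  have h := (PySem.Chars.findFrom_natCast_spec s p index (Nat.le_of_lt hlt) hne).1
  omega

-- the while loop of A, as recursion on the same state (index, remaining results)
def replacementsGo (s p r : List Char) (index : Nat) : List String :=
  if hlt : index < s.length then
    let j := PySem.Chars.findFrom s p (index : Int) none
    if hne : j = -1 then []
    else
      String.ofList (PySem.Chars.slice s (some 0) (some j) ++ r ++
          PySem.Chars.slice s (some (j + (p.length : Int))) none)
        :: replacementsGo s p r (j.toNat + 1)
  else []
termination_by s.length - index
decreasing_by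
  have := pv_findFrom_ge s p index hlt hne
  omega

def replacements (string : String) (src : String) (replacement : String) : List String :=
  replacementsGo string.toList src.toList replacement.toList 0

-- ===== PORT B =====
def replacements_alt (string : String) (src : String) (replacement : String) : List String :=
  (List.range string.toList.length).filterMap (fun (i : Nat) =>
    if PySem.Chars.slice string.toList (some (i : Int)) (some ((i : Int) + (src.toList.length : Int))) = src.toList then
      some (String.ofList (PySem.Chars.slice string.toList none (some (i : Int)) ++ replacement.toList ++
        PySem.Chars.slice string.toList (some ((i : Int) + (src.toList.length : Int))) none))
    else none)

-- ===== PRECONDITION & SPEC =====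
def Spec_replacements (string : String) (src : String) (replacement : String) (out : List String) : Prop := out = replacements_alt string src replacement
instance (string : String) (src : String) (replacement : String) (out : List String) : Decidable (Spec_replacements string src replacement out) := by unfold Spec_replacements; infer_instance

-- ===== CLAIM (what is proved, stated in full; the proofs are below) =====
def Claim_equal_replacements : Prop := ∀ (string : String) (src : String) (replacement : String), Dom_replacements string src replacement → Spec_replacements string src replacement (replacements string src replacement)

-- ===== LEMMAS AND PROOFS =====

-- the common canonical form: positions with a match, in order, mapped to the rebuilt string
def pvBuild (s r : List Char) (k : Nat) (i : Nat) : String :=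
  String.ofList (s.take i ++ r ++ s.drop (i + k))

def pvHit (s p : List Char) (i : Nat) : Bool := decide (p <+: s.drop i)

theorem pv_take_eq_iff_prefix (p t : List Char) : (t.take p.length = p) ↔ p <+: t := by
  constructor
  · intro h
    exact h ▸ List.take_prefix _ _
  · intro h
    exact ((List.prefix_iff_eq_take).1 h).symm

theorem pv_filterMap_eq (l : List Nat) (q : Nat → Bool) (f : Nat → String) :
    l.filterMap (fun i => if q i then some (f i) else none) = (l.filter q).map f := by
  induction l with
  | nil => simp
  | cons a t ih => by_cases h : q a <;> simp [h, ih]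

theorem pv_alt_eq (string src replacement : String) :
    replacements_alt string src replacement =
      ((List.range' 0 string.toList.length).filter
        (pvHit string.toList src.toList)).map
        (pvBuild string.toList replacement.toList src.toList.length) := by
  unfold replacements_alt
  rw [List.range_eq_range']
  have : ∀ i : Nat,
      (if PySem.Chars.slice string.toList (some (i : Int)) (some ((i : Int) + (src.toList.length : Int))) = src.toList then
        some (String.ofList (PySem.Chars.slice string.toList none (some (i : Int)) ++ replacement.toList ++
          PySem.Chars.slice string.toList (some ((i : Int) + (src.toList.length : Int))) none))
      else none)
      = (if pvHit string.toList src.toList i then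
          some (pvBuild string.toList replacement.toList src.toList.length i) else none) := by
    intro i
    simp only [PySem.Chars.slice_eq_listSlice, PySem.List.slice_natCast_add,
      PySem.List.slice_to_natCast]
    rw [show ((i : Int) + (src.toList.length : Int)) = ((i + src.toList.length : Nat) : Int) by push_cast; ring,
      PySem.List.slice_from_natCast]
    simp only [pvHit, pvBuild, pv_take_eq_iff_prefix]
    by_cases h : src.toList <+: string.toList.drop i <;> simp [h]
  simp only [this]
  exact pv_filterMap_eq _ _ _

-- prefix of a later drop is an infix of an earlier drop
theorem pv_infix_of_prefix_drop (s p : List Char) (a i : Nat) (ha : a ≤ i)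
    (h : p <+: s.drop i) : p <:+: s.drop a := by
  have : s.drop i = (s.drop a).drop (i - a) := by
    rw [List.drop_drop]; congr 1; omega
  rw [this] at h
  exact h.isInfix.trans (List.drop_suffix _ _).isInfix

-- loop characterisation: from index, A collects exactly the match positions ≥ index
theorem pv_go_eq (s p r : List Char) (index : Nat) :
    replacementsGo s p r index =
      ((List.range' index (s.length - index)).filter (pvHit s p)).map
        (pvBuild s r p.length) := by
  fun_induction replacementsGo s p r index
  case case2 =>
    rename_i index hlt j hne ih
    -- found a match at j
    have hjdef : j = PySem.Chars.findFrom s p (index : Int) := rfl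
    have hj := PySem.Chars.findFrom_natCast_spec s p index (Nat.le_of_lt hlt) hne
    rw [← hjdef] at hj
    have hj0 : (0 : Int) ≤ j := le_trans (by positivity) hj.1
    have hjn : (index : Nat) ≤ j.toNat := by omega
    have hpre : p <+: s.drop j.toNat := hj.2.1
    have hmin : ∀ i : Nat, index ≤ i → i < j.toNat → ¬ p <+: s.drop i := by
      intro i h1 h2
      exact hj.2.2 i (by exact_mod_cast h1) (by omega)
    have hjlt : j.toNat < s.length := by
      rcases eq_or_ne p [] with hp | hp
      · -- empty pattern: findFrom returns index itself
        subst hp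
        have hf := PySem.Chars.findFrom_natCast s [] index (Nat.le_of_lt hlt)
        rw [← hjdef] at hf
        simp [PySem.Chars.find_nil] at hf
        omega
      · have hne' : s.drop j.toNat ≠ [] := fun h0 => hp (List.prefix_nil.mp (h0 ▸ hpre))
        have := mt List.drop_eq_nil_iff.mpr hne'
        omega
    -- split the range at j.toNat
    rw [show s.length - index = (j.toNat - index) + (s.length - j.toNat) from by omega,
      ← List.range'_append, show index + 1 * (j.toNat - index) = j.toNat from by omega,
      List.filter_append]
    have hfirst : (List.range' index (j.toNat - index)).filter (pvHit s p) = [] := by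
      apply List.filter_eq_nil_iff.mpr
      intro i hi
      have := List.mem_range'_1.mp hi
      simp only [pvHit, decide_eq_true_eq]
      exact fun hc => hmin i this.1 (by omega) hc
    rw [hfirst]
    rw [show s.length - j.toNat = (s.length - (j.toNat + 1)) + 1 from by omega,
      List.range'_succ]
    have hhit : pvHit s p j.toNat = true := by simp [pvHit, hpre]
    simp only [List.nil_append, List.filter_cons, hhit, if_pos, List.map_cons]
    rw [ih]
    congr 1
    -- head element equals pvBuild
    simp only [pvBuild, PySem.Chars.slice_eq_listSlice, PySem.List.slice_zero_start,
      PySem.List.slice_to _ hj0, PySem.List.slice_from _ (by positivity : (0:Int) ≤ j + (p.length : Int))]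
    rw [show (j + (p.length : Int)).toNat = j.toNat + p.length from by omega]
  case case1 =>
    rename_i index hlt j hne
    -- find returned -1: no match position ≥ index exists
    have hnin : ¬ p <:+: s.drop index :=
      (PySem.Chars.findFrom_natCast_eq_neg_one_iff s p index (Nat.le_of_lt hlt)).mp hne
    symm
    simp only [List.map_eq_nil_iff]
    apply List.filter_eq_nil_iff.mpr
    intro i hi
    have hm := List.mem_range'_1.mp hi
    simp only [pvHit, decide_eq_true_eq]
    exact fun hc => hnin (pv_infix_of_prefix_drop s p index i hm.1 hc)
  case case3 =>
    rename_i index hge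
    have : s.length - index = 0 := by omega
    simp [this]

-- ===== VERDICT (by name: the statement is the Claim_ definition above) =====
theorem replacements_spec : Claim_equal_replacements := by
  intro string src replacement _
  show replacements string src replacement = replacements_alt string src replacement
  rw [pv_alt_eq, replacements, pv_go_eq]
  simp
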